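-- pv_equiv track=rewrite | github.com/Greg10-ai/gerador-recibos-pj | app.py | encontrar_imagem
-- ===== SOURCE A (Python) =====
-- import unicodedata
--
-- def normalizar_nome(nome):
--     nome = str(nome).strip().lower()
--     nome = unicodedata.normalize('NFKD', nome).encode('ASCII', 'ignore').decode('ASCII')
--     nome = " ".join(nome.split())
--     nome = nome.replace(" ", "")
--     return nome
--
-- def encontrar_imagem(nome_vendedor, mapa_imagens):
--     chave = normalizar_nome(nome_vendedor)
--
--     if chave in mapa_imagens:
--         return mapa_imagens[chave]
--
--     for k in mapa_imagens:
--         if chave in k or k in chave: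
--             return mapa_imagens[k]
--
--     return None
-- ===== SOURCE B (Python) =====
-- import unicodedata
--
-- def normalizar_nome(nome):
--     nome = str(nome).strip().lower()
--     nome = unicodedata.normalize('NFKD', nome).encode('ASCII', 'ignore').decode('ASCII')
--     nome = " ".join(nome.split())
--     nome = nome.replace(" ", "")
--     return nome
--
-- def encontrar_imagem(nome_vendedor, mapa_imagens):
--     chave = normalizar_nome(nome_vendedor)
--     fallback = None
--     for k, v in mapa_imagens.items():
--         if k == chave:
--             return v
--         if fallback is None and (chave in k or k in chave):
--             fallback = v
--     return fallback
-- ===== Notes on version B (the rewrite author's own statement) =====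
-- stated objective: alternative
-- what changed: Replaced the exact-lookup-then-separate-fallback-scan (membership test, dict indexing, then a second loop that re-indexes the dict per match) by one accumulator-carrying pass over items() that returns the pair's value directly on an exact key and records the first substring match as a set-once fallback.
import Mathlib
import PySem

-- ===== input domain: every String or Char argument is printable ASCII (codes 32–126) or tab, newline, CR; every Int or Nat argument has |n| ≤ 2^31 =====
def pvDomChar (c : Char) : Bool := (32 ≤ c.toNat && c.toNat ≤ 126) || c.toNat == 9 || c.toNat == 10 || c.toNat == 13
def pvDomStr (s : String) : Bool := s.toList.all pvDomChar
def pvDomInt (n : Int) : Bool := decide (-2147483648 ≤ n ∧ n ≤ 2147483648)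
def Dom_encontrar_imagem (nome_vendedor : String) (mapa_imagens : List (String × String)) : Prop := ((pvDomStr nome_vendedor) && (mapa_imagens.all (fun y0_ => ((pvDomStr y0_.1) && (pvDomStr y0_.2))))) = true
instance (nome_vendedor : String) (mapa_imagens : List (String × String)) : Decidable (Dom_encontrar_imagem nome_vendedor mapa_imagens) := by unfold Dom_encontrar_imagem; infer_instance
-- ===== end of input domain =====

-- B merges A's exact dict lookup and its separate substring-fallback scan into one
-- set-once-accumulator pass over the items (alternative decomposition, same cost class).


-- the fuzzy condition 'chave in k or k in chave' (shared by both ports)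
def pvFuzzy (chave k : String) : Bool := PySem.Str.isIn chave k || PySem.Str.isIn k chave

-- ===== PORT A =====
-- normalizar_nome (shared helper): strip + lower; the unicodedata NFKD / ASCII-encode
-- step is the identity on the printable-ASCII input domain and is ported as such;
-- then " ".join(split()) and replace(" ", "").
def pvNormalizar (nome : String) : String :=
  let n1 := PySem.Str.lower (PySem.Str.strip nome)
  let n2 := PySem.Str.join " " (PySem.Str.split₀ n1)
  PySem.Str.replace n2 " " ""

-- dict membership 'chave in mapa_imagens' (keys)
def pvContains : List (String × String) → String → Bool
  | [], _ => false
  | (k, _) :: rest, x => k == x || pvContains rest x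

-- dict indexing 'mapa_imagens[k]' (first matching key)
def pvLookup : List (String × String) → String → Option String
  | [], _ => none
  | (k, v) :: rest, x => if k == x then some v else pvLookup rest x

-- 'for k in mapa_imagens: if chave in k or k in chave: return mapa_imagens[k]'
def pvFallbackA (chave : String) (full : List (String × String)) : List (String × String) → Option String
  | [] => none
  | (k, _) :: rest =>
      if pvFuzzy chave k then pvLookup full k
      else pvFallbackA chave full rest

def encontrar_imagem (nome_vendedor : String) (mapa_imagens : List (String × String)) : Option String :=
  let chave := pvNormalizar nome_vendedor
  if pvContains mapa_imagens chave then pvLookup mapa_imagens chave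
  else pvFallbackA chave mapa_imagens mapa_imagens

-- ===== PORT B =====
-- single pass carrying the set-once fallback accumulator
def pvLoopB (chave : String) : List (String × String) → Option String → Option String
  | [], fallback => fallback
  | (k, v) :: rest, fallback =>
      if k == chave then some v
      else
        pvLoopB chave rest
          (if fallback.isNone && pvFuzzy chave k then some v else fallback)

def encontrar_imagem_alt (nome_vendedor : String) (mapa_imagens : List (String × String)) : Option String :=
  pvLoopB (pvNormalizar nome_vendedor) mapa_imagens none

-- ===== PRECONDITION & SPEC =====
def Spec_encontrar_imagem (nome_vendedor : String) (mapa_imagens : List (String × String)) (out : Option String) : Prop := out = encontrar_imagem_alt nome_vendedor mapa_imagens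
instance (nome_vendedor : String) (mapa_imagens : List (String × String)) (out : Option String) : Decidable (Spec_encontrar_imagem nome_vendedor mapa_imagens out) := by unfold Spec_encontrar_imagem; infer_instance

-- ===== CLAIM (what is proved, stated in full; the proofs are below) =====
def Claim_equal_encontrar_imagem : Prop := ∀ (nome_vendedor : String) (mapa_imagens : List (String × String)), Dom_encontrar_imagem nome_vendedor mapa_imagens → Spec_encontrar_imagem nome_vendedor mapa_imagens (encontrar_imagem nome_vendedor mapa_imagens)

-- ===== LEMMAS AND PROOFS =====

theorem pvContains_eq_isSome (m : List (String × String)) (x : String) :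
    pvContains m x = (pvLookup m x).isSome := by
  induction m with
  | nil => rfl
  | cons p rest ih =>
      obtain ⟨k, v⟩ := p
      by_cases h : k = x <;> simp [pvContains, pvLookup, h, ih]

theorem pvFallbackA_eq_find? (chave : String) (full m : List (String × String)) :
    pvFallbackA chave full m
      = (m.find? (fun p => pvFuzzy chave p.1)).bind (fun p => pvLookup full p.1) := by
  induction m with
  | nil => rfl
  | cons p rest ih =>
      obtain ⟨k, v⟩ := p
      simp only [pvFallbackA, List.find?_cons]
      cases hf : pvFuzzy chave k
      · simp [ih]
      · simp

-- the first fuzzy pair looks itself up: any earlier pair with the same key would be fuzzy too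
theorem pvLookup_of_find?_fuzzy (chave : String) (m : List (String × String))
    (k : String) (v : String) (h : m.find? (fun p => pvFuzzy chave p.1) = some (k, v)) :
    pvLookup m k = some v := by
  induction m with
  | nil => simp at h
  | cons p rest ih =>
      obtain ⟨k0, v0⟩ := p
      cases h0 : pvFuzzy chave k0 with
      | true =>
          rw [List.find?_cons_of_pos (by simpa using h0)] at h
          injection h with h'
          injection h' with hk hv
          simp [pvLookup, ← hk, hv]
      | false =>
          rw [List.find?_cons_of_neg (by simpa using h0)] at h
          have hfk : pvFuzzy chave k = true := by
            have := List.find?_some h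
            simpa using this
          have hne : ¬ (k0 = k) := by
            intro he; rw [he, hfk] at h0; cases h0
          simp [pvLookup, hne, ih h]

-- B's loop, fallback generalised
theorem pvLoopB_eq (chave : String) (m : List (String × String)) (fb : Option String) :
    pvLoopB chave m fb
      = match pvLookup m chave with
        | some v => some v
        | none =>
            match fb with
            | some c => some c
            | none => (m.find? (fun p => pvFuzzy chave p.1)).map (fun p => p.2) := by
  induction m generalizing fb with
  | nil => cases fb <;> rfl
  | cons p rest ih =>
      obtain ⟨k, v⟩ := p
      simp only [pvLoopB, pvLookup, List.find?_cons]
      by_cases hk : k = chave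
      · simp [hk]
      · have hk' : (k == chave) = false := by simpa using hk
        rw [hk']
        cases hf : pvFuzzy chave k with
        | false => cases fb <;> simp [ih]
        | true => cases fb <;> simp [ih]

-- ===== VERDICT (by name: the statement is the Claim_ definition above) =====
theorem encontrar_imagem_spec : Claim_equal_encontrar_imagem := by
  intro nv m _
  simp only [Spec_encontrar_imagem, encontrar_imagem, encontrar_imagem_alt]
  generalize pvNormalizar nv = chave
  rw [pvLoopB_eq, pvContains_eq_isSome, pvFallbackA_eq_find?]
  cases hl : pvLookup m chave with
  | some v => simp
  | none =>
      simp only [Option.isSome_none, Bool.false_eq_true, if_false]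
      cases hf : m.find? (fun p => pvFuzzy chave p.1) with
      | none => simp
      | some p =>
          obtain ⟨k, v⟩ := p
          simp [pvLookup_of_find?_fuzzy chave m k v hf]
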